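-- pv_equiv track=rewrite | github.com/OpenCobolIDE/OpenCobolIDE | open_cobol_ide/extlibs/pyqode/core/api/encodings.py | convert_to_codec_key
-- ===== SOURCE A (Python) =====
-- def convert_to_codec_key(value):
--     """
--     Normalize code key value (encoding codecs must be lower case and must
--     not contain any dashes).
--
--     :param value: value to convert.
--     """
--     if not value:
--         # fallback to utf-8
--         value = 'UTF-8'
--     # UTF-8 -> utf_8
--     converted = value.replace('-', '_').lower()
--     # fix some corner cases, see https://github.com/pyQode/pyQode/issues/11
--     all_aliases = {
--         'ascii': [
--             'us_ascii',
--             'us',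
--             'ansi_x3.4_1968',
--             'cp367',
--             'csascii',
--             'ibm367',
--             'iso_ir_6',
--             'iso646_us',
--             'iso_646.irv:1991'
--         ],
--         'utf-7': [
--             'csunicode11utf7',
--             'unicode_1_1_utf_7',
--             'unicode_2_0_utf_7',
--             'x_unicode_1_1_utf_7',
--             'x_unicode_2_0_utf_7',
--         ],
--         'utf_8': [
--             'unicode_1_1_utf_8',
--             'unicode_2_0_utf_8',
--             'x_unicode_1_1_utf_8',
--             'x_unicode_2_0_utf_8',
--         ],
--         'utf_16': [
--             'utf_16le',
--             'ucs_2',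
--             'unicode',
--             'iso_10646_ucs2'
--         ],
--         'latin_1': ['iso_8859_1']
--     }
--
--     for key, aliases in all_aliases.items():
--         if converted in aliases:
--             return key
--     return converted
-- ===== SOURCE B (Python) =====
-- # Binary search over a flat sorted (alias, key) table, with single-pass
-- # per-character normalization instead of replace+lower.
-- _ALIASES = [
--     ('ansi_x3.4_1968', 'ascii'),
--     ('cp367', 'ascii'),
--     ('csascii', 'ascii'),
--     ('csunicode11utf7', 'utf-7'),
--     ('ibm367', 'ascii'),
--     ('iso646_us', 'ascii'),
--     ('iso_10646_ucs2', 'utf_16'),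
--     ('iso_646.irv:1991', 'ascii'),
--     ('iso_8859_1', 'latin_1'),
--     ('iso_ir_6', 'ascii'),
--     ('ucs_2', 'utf_16'),
--     ('unicode', 'utf_16'),
--     ('unicode_1_1_utf_7', 'utf-7'),
--     ('unicode_1_1_utf_8', 'utf_8'),
--     ('unicode_2_0_utf_7', 'utf-7'),
--     ('unicode_2_0_utf_8', 'utf_8'),
--     ('us', 'ascii'),
--     ('us_ascii', 'ascii'),
--     ('utf_16le', 'utf_16'),
--     ('x_unicode_1_1_utf_7', 'utf-7'),
--     ('x_unicode_1_1_utf_8', 'utf_8'),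
--     ('x_unicode_2_0_utf_7', 'utf-7'),
--     ('x_unicode_2_0_utf_8', 'utf_8'),
-- ]
--
--
-- def convert_to_codec_key(value):
--     converted = ''.join(
--         '_' if c == '-' else c.lower() for c in (value or 'UTF-8'))
--     lo, hi = 0, len(_ALIASES)
--     while lo < hi:
--         mid = (lo + hi) // 2
--         alias, key = _ALIASES[mid]
--         if alias == converted:
--             return key
--         if alias < converted:
--             lo = mid + 1
--         else:
--             hi = mid
--     return converted
-- ===== Notes on version B (the rewrite author's own statement) =====
-- stated objective: alternative
-- what changed: The nested {key:[aliases]} table scanned group by group is replaced by a flat sorted (alias,key) array searched with a hand-written binary-search loop, and the two-pass normalization (dash replacement, then lowercasing) becomes a single per-character pass joined back into a string.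
import Mathlib
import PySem

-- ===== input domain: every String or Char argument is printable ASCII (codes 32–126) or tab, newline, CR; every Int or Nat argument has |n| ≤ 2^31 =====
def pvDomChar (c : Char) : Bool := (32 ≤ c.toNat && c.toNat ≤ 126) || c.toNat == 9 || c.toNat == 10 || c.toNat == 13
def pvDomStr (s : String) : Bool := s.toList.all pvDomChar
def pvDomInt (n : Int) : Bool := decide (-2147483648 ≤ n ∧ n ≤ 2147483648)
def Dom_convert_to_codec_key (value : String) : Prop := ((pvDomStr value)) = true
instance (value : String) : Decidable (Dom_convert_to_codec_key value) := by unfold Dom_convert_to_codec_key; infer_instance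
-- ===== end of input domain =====

-- B replaces A's group-by-group scan of the nested alias table with a binary search over a
-- flat sorted (alias, key) array and normalizes the string in one per-character pass
-- (objective: alternative; same observable result).

-- ===== PORT A =====
-- A's nested alias table (dict literal of A, key -> list of aliases)
def pvTableA : List (String × List String) :=
  [("ascii", ["us_ascii", "us", "ansi_x3.4_1968", "cp367", "csascii", "ibm367", "iso_ir_6", "iso646_us", "iso_646.irv:1991"]),
   ("utf-7", ["csunicode11utf7", "unicode_1_1_utf_7", "unicode_2_0_utf_7", "x_unicode_1_1_utf_7", "x_unicode_2_0_utf_7"]),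
   ("utf_8", ["unicode_1_1_utf_8", "unicode_2_0_utf_8", "x_unicode_1_1_utf_8", "x_unicode_2_0_utf_8"]),
   ("utf_16", ["utf_16le", "ucs_2", "unicode", "iso_10646_ucs2"]),
   ("latin_1", ["iso_8859_1"])]

-- the for-loop over all_aliases.items(): first group whose alias list contains converted
def pvLoopA : String → List (String × List String) → String
  | conv, [] => conv
  | conv, (key, aliases) :: rest => if aliases.contains conv then key else pvLoopA conv rest

def convert_to_codec_key (value : String) : String :=
  let value := if value = "" then "UTF-8" else value
  let converted := PySem.Str.lower (PySem.Str.replace value "-" "_")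
  pvLoopA converted (PySem.Dict.ofList pvTableA).items

-- ===== PORT B =====
-- Source B's flat SORTED (alias, key) table
def pvAliases : List (String × String) :=
  [("ansi_x3.4_1968", "ascii"),
   ("cp367", "ascii"),
   ("csascii", "ascii"),
   ("csunicode11utf7", "utf-7"),
   ("ibm367", "ascii"),
   ("iso646_us", "ascii"),
   ("iso_10646_ucs2", "utf_16"),
   ("iso_646.irv:1991", "ascii"),
   ("iso_8859_1", "latin_1"),
   ("iso_ir_6", "ascii"),
   ("ucs_2", "utf_16"),
   ("unicode", "utf_16"),
   ("unicode_1_1_utf_7", "utf-7"),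
   ("unicode_1_1_utf_8", "utf_8"),
   ("unicode_2_0_utf_7", "utf-7"),
   ("unicode_2_0_utf_8", "utf_8"),
   ("us", "ascii"),
   ("us_ascii", "ascii"),
   ("utf_16le", "utf_16"),
   ("x_unicode_1_1_utf_7", "utf-7"),
   ("x_unicode_1_1_utf_8", "utf_8"),
   ("x_unicode_2_0_utf_7", "utf-7"),
   ("x_unicode_2_0_utf_8", "utf_8")]

-- the generator expression's per-character normalizer (underscore for a dash, else lowercase)
def pvNormChar (c : Char) : Char := if c = '-' then '_' else PySem.Chars.lowerChar c

-- Source B's while lo < hi binary-search loop; the fuel argument only makes the loop total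
-- (hi - lo shrinks every iteration, so fuel = initial hi - lo is never exhausted)
def pvBSearch (conv : String) : Nat → Nat → Nat → String
  | 0, _, _ => conv
  | fuel + 1, lo, hi =>
    if lo < hi then
      let mid := (lo + hi) / 2
      let p := pvAliases.getD mid ("", "")
      if p.1 = conv then p.2
      else if PySem.Chars.strLt p.1.toList conv.toList then pvBSearch conv fuel (mid + 1) hi
      else pvBSearch conv fuel lo mid
    else conv

def convert_to_codec_key_alt (value : String) : String :=
  let converted := String.ofList ((if value = "" then "UTF-8" else value).toList.map pvNormChar)
  pvBSearch converted pvAliases.length 0 pvAliases.length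

-- ===== PRECONDITION & SPEC =====
def Spec_convert_to_codec_key (value : String) (out : String) : Prop := out = convert_to_codec_key_alt value
instance (value : String) (out : String) : Decidable (Spec_convert_to_codec_key value out) := by unfold Spec_convert_to_codec_key; infer_instance

-- ===== CLAIM (what is proved, stated in full; the proofs are below) =====
def Claim_equal_convert_to_codec_key : Prop := ∀ (value : String), Dom_convert_to_codec_key value → Spec_convert_to_codec_key value (convert_to_codec_key value)

-- ===== LEMMAS AND PROOFS =====

-- replace.go with the single-char dash pattern is a per-character map
theorem pv_replace_go_dash (fuel : Nat) : ∀ (l acc : List Char), l.length ≤ fuel →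
    PySem.Chars.replace.go ['-'] ['_'] fuel l acc
      = acc.reverse ++ l.map (fun c => if c = '-' then '_' else c) := by
  induction fuel with
  | zero =>
    intro l acc h
    have hl : l = [] := List.length_eq_zero_iff.mp (Nat.le_zero.mp h)
    subst hl; simp [PySem.Chars.replace.go]
  | succ n ih =>
    intro l acc h
    cases l with
    | nil => simp [PySem.Chars.replace.go]
    | cons c t =>
      simp only [PySem.Chars.replace.go]
      by_cases hc : c = '-'
      · subst hc
        have : List.isPrefixOf ['-'] ('-' :: t) = true := by simp [List.isPrefixOf]
        simp only [this, if_pos]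
        rw [ih (List.drop ['-'].length ('-' :: t)) (['_'].reverse ++ acc) (by simp at h ⊢; omega)]
        simp
      · have : List.isPrefixOf ['-'] (c :: t) = false := by simp [List.isPrefixOf, Ne.symm hc]
        simp only [this, Bool.false_eq_true, if_neg, not_false_iff]
        rw [ih t (c :: acc) (by simp at h ⊢; omega)]
        simp [hc]

-- A's staged replace-then-lower normalization equals B's single per-character pass
theorem pv_norm_eq (s : String) :
    PySem.Str.lower (PySem.Str.replace s "-" "_") = String.ofList (s.toList.map pvNormChar) := by
  have h : (PySem.Str.lower (PySem.Str.replace s "-" "_")).toList = s.toList.map pvNormChar := by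
    simp only [PySem.Str.toList_lower, PySem.Str.toList_replace]
    show PySem.Chars.lower (PySem.Chars.replace s.toList ['-'] ['_']) = _
    unfold PySem.Chars.replace
    simp only [List.isEmpty_cons, Bool.false_eq_true, if_neg, not_false_iff]
    rw [pv_replace_go_dash s.toList.length s.toList [] (le_refl _)]
    simp only [List.reverse_nil, List.nil_append, PySem.Chars.lower, List.map_map]
    refine List.map_congr_left (fun c _ => ?_)
    show PySem.Chars.lowerChar (if c = '-' then '_' else c) = pvNormChar c
    by_cases hc : c = '-'
    · subst hc; decide
    · simp [pvNormChar, hc]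
  calc PySem.Str.lower (PySem.Str.replace s "-" "_")
      = String.ofList (PySem.Str.lower (PySem.Str.replace s "-" "_")).toList := Eq.symm String.ofList_toList
    _ = String.ofList (s.toList.map pvNormChar) := by rw [h]

-- binary search over pvAliases returns conv itself when no alias equals conv
theorem pv_bsearch_miss (conv : String) (h : ∀ p ∈ pvAliases, p.1 ≠ conv) :
    ∀ (fuel lo hi : Nat), hi ≤ pvAliases.length → pvBSearch conv fuel lo hi = conv := by
  intro fuel
  induction fuel with
  | zero => intro lo hi _; rfl
  | succ n ih =>
    intro lo hi hhi
    simp only [pvBSearch]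
    by_cases hlt : lo < hi
    · simp only [hlt, if_pos]
      have hmid : (lo + hi) / 2 < pvAliases.length := by omega
      have hmem : pvAliases.getD ((lo + hi) / 2) ("", "") ∈ pvAliases := by
        rw [List.getD_eq_getElem pvAliases _ hmid]; exact List.getElem_mem hmid
      have hne := h _ hmem
      simp only [hne, if_neg, not_false_iff]
      by_cases hlt2 : PySem.Chars.strLt (pvAliases.getD ((lo + hi) / 2) ("", "")).1.toList conv.toList = true
      · simp only [hlt2, if_true]
        exact ih _ _ hhi
      · simp only [Bool.not_eq_true] at hlt2
        simp only [hlt2, Bool.false_eq_true, if_neg, not_false_iff]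
        exact ih _ _ (by omega)
    · simp [hlt]

-- the core fact: A's scan over the nested table = B's binary search over the flat table
theorem pv_scan_eq_bsearch (conv : String) :
    pvLoopA conv (PySem.Dict.ofList pvTableA).items
      = pvBSearch conv pvAliases.length 0 pvAliases.length := by
  by_cases h : conv ∈ pvAliases.map (·.1)
  · simp only [pvAliases, List.map_cons, List.map_nil, List.mem_cons, List.not_mem_nil, or_false] at h
    rcases h with rfl | rfl | rfl | rfl | rfl | rfl | rfl | rfl | rfl | rfl | rfl | rfl | rfl | rfl | rfl | rfl | rfl | rfl | rfl | rfl | rfl | rfl | rfl <;> decide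
  · have hB := pv_bsearch_miss conv (by
      intro p hp he
      exact h (he ▸ List.mem_map_of_mem hp)) pvAliases.length 0 pvAliases.length (le_refl _)
    rw [hB]
    simp only [pvAliases, List.map_cons, List.map_nil, List.mem_cons, List.not_mem_nil, or_false] at h
    simp only [not_or] at h
    obtain ⟨h0, h1, h2, h3, h4, h5, h6, h7, h8, h9, h10, h11, h12, h13, h14, h15, h16, h17, h18, h19, h20, h21, h22⟩ := h
    have hitems : (PySem.Dict.ofList pvTableA).items = pvTableA := by decide
    rw [hitems]
    simp [pvLoopA, pvTableA,
      h0, h1, h2, h3, h4, h5, h6, h7, h8, h9, h10, h11, h12, h13, h14, h15, h16, h17, h18, h19,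
      h20, h21, h22]

-- ===== VERDICT (by name: the statement is the Claim_ definition above) =====
theorem convert_to_codec_key_spec : Claim_equal_convert_to_codec_key := by
  intro value _
  show convert_to_codec_key value = convert_to_codec_key_alt value
  show pvLoopA (PySem.Str.lower (PySem.Str.replace (if value = "" then "UTF-8" else value) "-" "_"))
        (PySem.Dict.ofList pvTableA).items
      = pvBSearch (String.ofList ((if value = "" then "UTF-8" else value).toList.map pvNormChar))
          pvAliases.length 0 pvAliases.length
  rw [pv_norm_eq]
  exact pv_scan_eq_bsearch _
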